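-- pv_equiv track=rewrite | github.com/miliar/Code_Jam_Webscraper | solutions_python/Problem_76/813.py | calculate_candy_split
-- ===== SOURCE A (Python) =====
-- def calculate_candy_split(number_list):
--   xor_all_number = 0
--   lowest_number = number_list[0]
--   running_sum = 0
--
--   for number in number_list:
--     xor_all_number=xor_all_number^number
--     running_sum = running_sum+number
--
--     if lowest_number>number:
--         lowest_number = number
--
--   if xor_all_number!=0:
--       return_value="NO"
--   else:
--       return_value=str(running_sum-lowest_number)
--
--   return return_value
-- ===== SOURCE B (Python) =====
-- def _agg(nl, lo, hi):
--     # (xor, sum, min) of nl[lo:hi] by divide and conquer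
--     if hi - lo <= 1:
--         v = nl[lo]
--         return (v, v, v)
--     mid = (lo + hi) // 2
--     x1, s1, m1 = _agg(nl, lo, mid)
--     x2, s2, m2 = _agg(nl, mid, hi)
--     return (x1 ^ x2, s1 + s2, min(m1, m2))
--
-- def calculate_candy_split(number_list):
--     x, s, m = _agg(number_list, 0, len(number_list))
--     if x != 0:
--         return "NO"
--     return str(s - m)
-- ===== Notes on version B (the rewrite author's own statement) =====
-- stated objective: alternative
-- what changed: Replaced A's single left-to-right fused loop by a divide-and-conquer recursion that computes (xor, sum, min) of each half-slice and merges them; same final branch.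
import Mathlib
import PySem

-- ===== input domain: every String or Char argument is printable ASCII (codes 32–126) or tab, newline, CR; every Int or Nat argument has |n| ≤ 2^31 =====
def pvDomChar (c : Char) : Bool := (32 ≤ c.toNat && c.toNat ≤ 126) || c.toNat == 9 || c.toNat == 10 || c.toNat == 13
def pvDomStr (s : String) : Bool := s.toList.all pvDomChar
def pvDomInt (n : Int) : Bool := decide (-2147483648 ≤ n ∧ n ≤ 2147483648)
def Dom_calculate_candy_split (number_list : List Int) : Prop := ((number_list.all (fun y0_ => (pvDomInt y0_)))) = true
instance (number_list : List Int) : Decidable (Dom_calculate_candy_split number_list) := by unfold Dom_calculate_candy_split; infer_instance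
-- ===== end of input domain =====

-- B replaces A's single fused left-to-right loop (xor/min/sum tracked together) by a
-- divide-and-conquer recursion computing (xor, sum, min) of half-slices and merging them.
-- Objective: alternative (same O(n) cost, different traversal shape).


-- ===== PORT A =====
def calculate_candy_split (number_list : List Int) : String :=
  match PySem.List.pyGet? number_list 0 with
  | none => ""   -- IndexError on empty input; excluded by Pre_
  | some lowest0 =>
    let st := number_list.foldl
      (fun (acc : Int × Int × Int) number =>
        (PySem.Int.bxor acc.1 number,
         (if acc.2.1 > number then number else acc.2.1),
         acc.2.2 + number))
      (0, lowest0, 0)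
    if st.1 ≠ 0 then "NO" else PySem.Int.toStr (st.2.2 - st.2.1)

-- ===== PORT B =====
-- _agg(nl, lo, hi): divide and conquer over the slice nl[lo:hi].
-- 'v = nl[lo]' raises IndexError only on the empty list (excluded by Pre_); ported as
-- pyGetD with default 0, exact whenever 0 ≤ lo < len(nl). '(lo + hi) // 2' is ported as
-- Nat division, exact since lo, hi ≥ 0.
def pvAgg (nl : List Int) (lo hi : Nat) : Int × Int × Int :=
  if hi ≤ lo + 1 then
    let v := PySem.List.pyGetD nl (lo : Int) 0
    (v, v, v)
  else
    let mid := (lo + hi) / 2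
    let l := pvAgg nl lo mid
    let r := pvAgg nl mid hi
    (PySem.Int.bxor l.1 r.1, l.2.1 + r.2.1, min l.2.2 r.2.2)
  termination_by hi - lo
  decreasing_by all_goals omega

def calculate_candy_split_alt (number_list : List Int) : String :=
  let t := pvAgg number_list 0 number_list.length
  if t.1 ≠ 0 then "NO" else PySem.Int.toStr (t.2.1 - t.2.2)

-- ===== PRECONDITION & SPEC =====
-- Pre_ excludes only the empty list, on which both A and B raise IndexError.
def Pre_calculate_candy_split (number_list : List Int) : Prop := number_list ≠ []
instance (number_list : List Int) : Decidable (Pre_calculate_candy_split number_list) := by unfold Pre_calculate_candy_split; infer_instance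
def pvWitness_calculate_candy_split : List Int := [3, 5, 3, 5, 7]
def Spec_calculate_candy_split (number_list : List Int) (out : String) : Prop := out = calculate_candy_split_alt number_list
instance (number_list : List Int) (out : String) : Decidable (Spec_calculate_candy_split number_list out) := by unfold Spec_calculate_candy_split; infer_instance

-- ===== CLAIM =====
def Claim_equal_calculate_candy_split : Prop := ∀ (number_list : List Int), Dom_calculate_candy_split number_list → Pre_calculate_candy_split number_list → Spec_calculate_candy_split number_list (calculate_candy_split number_list)

-- ===== LEMMAS AND PROOFS =====

-- Two's-complement encoding of an Int: sign bit plus magnitude; bxor acts componentwise.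
def pvDec (s : Bool) (m : Nat) : Int := if s then -(m : Int) - 1 else (m : Int)
def pvS (a : Int) : Bool := decide (a < 0)
def pvU (a : Int) : Nat := if a < 0 then (-a - 1).toNat else a.toNat

theorem pvS_pvDec (s : Bool) (m : Nat) : pvS (pvDec s m) = s := by
  cases s
  all_goals simp [pvS, pvDec]
  omega

theorem pvU_pvDec (s : Bool) (m : Nat) : pvU (pvDec s m) = m := by
  cases s
  all_goals simp [pvU, pvDec]
  all_goals omega

theorem bxor_eq_pvDec (a b : Int) :
    PySem.Int.bxor a b = pvDec (xor (pvS a) (pvS b)) (pvU a ^^^ pvU b) := by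
  simp only [PySem.Int.bxor, pvDec, pvS, pvU]
  split_ifs with h1 h2 h3 h4 h5 h6 h7 h8 h9 h10
  all_goals first
    | rfl
    | omega
    | (congr 2; omega)
    | (simp at *; congr 3; omega)

theorem pv_bxor_assoc (a b c : Int) :
    PySem.Int.bxor (PySem.Int.bxor a b) c = PySem.Int.bxor a (PySem.Int.bxor b c) := by
  rw [bxor_eq_pvDec a b, bxor_eq_pvDec b c,
      bxor_eq_pvDec (pvDec (xor (pvS a) (pvS b)) (pvU a ^^^ pvU b)) c,
      bxor_eq_pvDec a (pvDec (xor (pvS b) (pvS c)) (pvU b ^^^ pvU c)),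
      pvS_pvDec, pvU_pvDec, pvS_pvDec, pvU_pvDec, Bool.xor_assoc, Nat.xor_assoc]

theorem pv_zero_bxor (a : Int) : PySem.Int.bxor 0 a = a := by
  rw [PySem.Int.bxor_comm, PySem.Int.bxor_zero]

-- folding an associative op: the accumulator pulls out
theorem foldl_op_out (op : Int → Int → Int)
    (hassoc : ∀ a b c, op (op a b) c = op a (op b c)) :
    ∀ (l : List Int) (a b : Int), l.foldl op (op a b) = op a (l.foldl op b) := by
  intro l
  induction l with
  | nil => intro a b; rfl
  | cons x t ih => intro a b; simp only [List.foldl_cons, hassoc, ih]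

-- the three aggregates of a nonempty slice
def pvXor (S : List Int) : Int := S.foldl PySem.Int.bxor 0
def pvSum (S : List Int) : Int := S.foldl (· + ·) 0
def pvMin (S : List Int) : Int := match S with
  | [] => 0
  | h :: t => t.foldl min h

theorem pvXor_append (S1 S2 : List Int) :
    pvXor (S1 ++ S2) = PySem.Int.bxor (pvXor S1) (pvXor S2) := by
  simp only [pvXor, List.foldl_append]
  rw [show S1.foldl PySem.Int.bxor 0 = PySem.Int.bxor (S1.foldl PySem.Int.bxor 0) 0 from
        (PySem.Int.bxor_zero _).symm,
      foldl_op_out _ pv_bxor_assoc, PySem.Int.bxor_zero]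

theorem pvSum_append (S1 S2 : List Int) : pvSum (S1 ++ S2) = pvSum S1 + pvSum S2 := by
  simp only [pvSum, List.foldl_append]
  rw [show S1.foldl (· + ·) 0 = S1.foldl (· + ·) 0 + 0 from (add_zero _).symm,
      foldl_op_out _ add_assoc, add_zero]

theorem pvMin_append (S1 S2 : List Int) (h1 : S1 ≠ []) (h2 : S2 ≠ []) :
    pvMin (S1 ++ S2) = min (pvMin S1) (pvMin S2) := by
  match S1, S2 with
  | a :: t1, b :: t2 =>
    simp only [pvMin, List.cons_append, List.foldl_append, List.foldl_cons]
    rw [foldl_op_out _ min_assoc]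

theorem pvAgg_spec (nl : List Int) :
    ∀ (k lo hi : Nat), hi - lo ≤ k → lo < hi → hi ≤ nl.length →
      pvAgg nl lo hi =
        (pvXor ((nl.drop lo).take (hi - lo)),
         pvSum ((nl.drop lo).take (hi - lo)),
         pvMin ((nl.drop lo).take (hi - lo))) := by
  intro k
  induction k with
  | zero => intro lo hi hk hlt _; omega
  | succ k ih =>
    intro lo hi hk hlt hle
    rw [pvAgg]
    by_cases hbase : hi ≤ lo + 1
    · have hhi : hi = lo + 1 := by omega
      have hlo : lo < nl.length := by omega
      simp only [if_pos hbase]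
      have hdrop : nl.drop lo = nl[lo] :: nl.drop (lo + 1) := List.drop_eq_getElem_cons hlo
      have htake : (nl.drop lo).take (hi - lo) = [nl[lo]] := by
        have h1 : hi - lo = 1 := by omega
        rw [h1, hdrop]
        rfl
      rw [htake,
          PySem.List.pyGetD_eq_getElem nl 0 (by positivity) (by exact_mod_cast hlo)]
      simp only [pvXor, pvSum, pvMin, List.foldl_cons, List.foldl_nil, zero_add,
        pv_zero_bxor, Int.toNat_natCast]
    · simp only [if_neg hbase]
      have hm1 : lo < (lo + hi) / 2 := by omega
      have hm2 : (lo + hi) / 2 < hi := by omega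
      have hk1 : (lo + hi) / 2 - lo ≤ k := by omega
      have hk2 : hi - (lo + hi) / 2 ≤ k := by omega
      have hle1 : (lo + hi) / 2 ≤ nl.length := by omega
      rw [ih lo ((lo + hi) / 2) hk1 hm1 hle1, ih ((lo + hi) / 2) hi hk2 hm2 hle]
      have hsplit : (nl.drop lo).take (hi - lo)
          = (nl.drop lo).take ((lo + hi) / 2 - lo) ++ (nl.drop ((lo + hi) / 2)).take (hi - (lo + hi) / 2) := by
        have : hi - lo = ((lo + hi) / 2 - lo) + (hi - (lo + hi) / 2) := by omega
        rw [this, List.take_add, List.drop_drop,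
          show lo + ((lo + hi) / 2 - lo) = (lo + hi) / 2 from by omega]
      have hlen1 : ((nl.drop lo).take ((lo + hi) / 2 - lo)).length = (lo + hi) / 2 - lo := by
        simp [List.length_take, List.length_drop]; omega
      have hlen2 : ((nl.drop ((lo + hi) / 2)).take (hi - (lo + hi) / 2)).length = hi - (lo + hi) / 2 := by
        simp [List.length_take, List.length_drop]; omega
      have hne1 : (nl.drop lo).take ((lo + hi) / 2 - lo) ≠ [] := by
        intro h; rw [h] at hlen1; simp at hlen1; omega
      have hne2 : (nl.drop ((lo + hi) / 2)).take (hi - (lo + hi) / 2) ≠ [] := by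
        intro h; rw [h] at hlen2; simp at hlen2; omega
      rw [hsplit, pvXor_append, pvSum_append, pvMin_append _ _ hne1 hne2]

-- A's fused fold splits into three independent folds.
theorem fused_split (t : List Int) : ∀ (x l s : Int),
    t.foldl (fun (acc : Int × Int × Int) number =>
        (PySem.Int.bxor acc.1 number,
         (if acc.2.1 > number then number else acc.2.1),
         acc.2.2 + number)) (x, l, s)
      = (t.foldl PySem.Int.bxor x, t.foldl min l, t.foldl (· + ·) s) := by
  induction t with
  | nil => intro x l s; simp
  | cons b t ih =>
    intro x l s
    have hm : (if l > b then b else l) = min l b := by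
      rw [min_def]; split_ifs <;> omega
    simp only [List.foldl_cons, hm, ih]

-- ===== VERDICT =====
theorem calculate_candy_split_spec : Claim_equal_calculate_candy_split := by
  intro number_list _hdom hpre
  unfold Spec_calculate_candy_split
  match number_list with
  | [] => exact absurd rfl hpre
  | h :: t =>
    have hspec := pvAgg_spec (h :: t) (h :: t).length 0 (h :: t).length
      (by omega) (by simp) (by omega)
    simp only [List.drop_zero, List.take_length, Nat.sub_zero] at hspec
    simp only [calculate_candy_split, calculate_candy_split_alt, hspec]
    simp only [PySem.List.pyGet?, PySem.List.pyIdx?]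
    simp only [fused_split, pvXor, pvSum, pvMin, List.foldl_cons, pv_zero_bxor, zero_add]
    simp
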